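-- pv_equiv track=rewrite | github.com/jakob655/ProcessMiningVisualization_Schuetz_WS2025 | mining_algorithms/alpha_mining.py | _calculate_causality
-- ===== SOURCE A (Python) =====
-- def _calculate_causality(direct_succession):
--     causality = []
--     for pair in direct_succession:
--         pair_reversed = (pair[1], pair[0])
--         if pair_reversed not in direct_succession:
--             pair_not_reversed = (pair[0], pair[1])
--             causality.append(pair_not_reversed)
--     return set(causality)
-- ===== SOURCE B (Python) =====
-- def _calculate_causality(direct_succession):
--     seen = set()
--     causality = set()
--     for a, b in direct_succession:
--         seen.add((a, b))
--         if (b, a) in seen: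
--             causality.discard((b, a))
--         else:
--             causality.add((a, b))
--     return causality
-- ===== Notes on version B (the rewrite author's own statement) =====
-- stated objective: alternative
-- what changed: Replaces A's offline filter (which rescans the whole input list for each pair's reverse) with a single online pass that maintains a seen-set and a candidate set, adding each new pair as a candidate and retracting a candidate the moment its reverse is encountered.
import Mathlib
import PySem

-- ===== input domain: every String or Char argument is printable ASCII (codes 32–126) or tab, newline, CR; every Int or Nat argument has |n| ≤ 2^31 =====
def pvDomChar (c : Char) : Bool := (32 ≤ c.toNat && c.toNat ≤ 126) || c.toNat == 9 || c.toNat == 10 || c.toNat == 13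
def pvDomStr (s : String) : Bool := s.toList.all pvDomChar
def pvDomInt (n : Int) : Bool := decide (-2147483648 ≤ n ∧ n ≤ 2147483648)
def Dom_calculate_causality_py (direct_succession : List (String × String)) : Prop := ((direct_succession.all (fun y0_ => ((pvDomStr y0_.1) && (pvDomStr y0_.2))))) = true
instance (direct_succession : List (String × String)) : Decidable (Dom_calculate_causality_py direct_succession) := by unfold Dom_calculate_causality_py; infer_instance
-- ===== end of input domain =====

-- B is a single online pass keeping two evolving sets (pairs seen so far, current
-- candidates) and retracting a candidate when its reverse appears, instead of A's
-- offline filter that scans the whole input for each pair (objective: alternative).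

-- ===== PORT A =====
-- literal port of A: accumulate pairs whose reversal is not in the input list, then set()
def calculate_causality_py (direct_succession : List (String × String)) : List (String × String) :=
  PySem.Set.ofList
    (direct_succession.foldl
      (fun causality pair =>
        if direct_succession.contains (pair.2, pair.1) then causality
        else causality ++ [(pair.1, pair.2)])
      [])

-- ===== PORT B =====
-- literal port of B: one pass; seen.add(pair); if reverse in seen, discard reverse
-- from causality, else add pair to causality; return causality
def calculate_causality_py_alt (direct_succession : List (String × String)) : List (String × String) :=
  (direct_succession.foldl
    (fun (st : PySem.Set (String × String) × PySem.Set (String × String)) pair =>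
      let seen := st.1.add pair
      if seen.contains (pair.2, pair.1)
      then (seen, st.2.discard (pair.2, pair.1))
      else (seen, st.2.add pair))
    ([], [])).2

-- ===== PRECONDITION & SPEC =====
def Spec_calculate_causality_py (direct_succession : List (String × String)) (out : List (String × String)) : Prop := out = calculate_causality_py_alt direct_succession
instance (direct_succession : List (String × String)) (out : List (String × String)) : Decidable (Spec_calculate_causality_py direct_succession out) := by unfold Spec_calculate_causality_py; infer_instance

-- ===== CLAIM =====
def Claim_equal_calculate_causality_py : Prop := ∀ (direct_succession : List (String × String)), Dom_calculate_causality_py direct_succession → Spec_calculate_causality_py direct_succession (calculate_causality_py direct_succession)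

-- ===== LEMMAS AND PROOFS =====

-- the canonical result both programs compute: first occurrences of the pairs of l
-- whose reverse is absent from l
def keepF (l : List (String × String)) : List (String × String) :=
  (PySem.Set.ofList l).filter (fun p => !l.contains (p.2, p.1))

-- A's loop (skip when condition holds, else append) is a filter by the negated condition.
theorem foldl_skip_if {α β : Type} (p : α → Bool) (f : α → β) (l : List α) (acc : List β) :
    l.foldl (fun acc x => if p x then acc else acc ++ [f x]) acc
      = acc ++ (l.filter (fun x => !p x)).map f := by
  induction l generalizing acc with
  | nil => simp
  | cons x xs ih =>
    cases h : p x <;> simp [List.foldl_cons, h, ih]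

-- deduplication (first occurrences) commutes with filtering
theorem ofList_filter {α : Type} [BEq α] [LawfulBEq α] (q : α → Bool) (l : List α) :
    PySem.Set.ofList (l.filter q) = (PySem.Set.ofList l).filter q := by
  induction l with
  | nil => simp [PySem.Set.ofList_nil]
  | cons x xs ih =>
    cases h : q x with
    | true =>
      rw [List.filter_cons_of_pos h, PySem.Set.ofList_cons, PySem.Set.ofList_cons,
        List.filter_cons_of_pos h, ih]
      simp [PySem.Set.discard, List.filter_filter, Bool.and_comm]
    | false =>
      rw [List.filter_cons_of_neg (by simp [h]), PySem.Set.ofList_cons,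
        List.filter_cons_of_neg (by simp [h]), ih, PySem.Set.discard, List.filter_filter]
      apply List.filter_congr
      intro a _
      cases hq : q a with
      | true =>
        have : (a == x) = false := by
          simp only [beq_eq_false_iff_ne, ne_eq]
          intro hax
          rw [hax, h] at hq
          exact Bool.false_ne_true hq
        simp [this]
      | false => simp

-- how the canonical result grows when one pair is appended to the input
theorem keepF_append (l : List (String × String)) (x : String × String) :
    keepF (l ++ [x])
      = (keepF l).filter (fun p => !((p.2, p.1) == x))
        ++ (if x ∉ l ∧ (x.2, x.1) ∉ l ∧ (x.2, x.1) ≠ x then [x] else []) := by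
  unfold keepF
  rw [PySem.Set.ofList_append_singleton, PySem.Set.add_eq_ite, List.filter_filter]
  have hpt : ∀ p : String × String,
      (!(l ++ [x]).contains (p.2, p.1))
        = ((!((p.2, p.1) == x)) && (!l.contains (p.2, p.1))) := by
    intro p
    rw [List.contains_append]
    cases h1 : l.contains (p.2, p.1) <;> cases h2 : ((p.2, p.1) == x) <;>
      simp_all [List.contains_eq_mem]
  by_cases hx : x ∈ PySem.Set.ofList l
  · rw [if_pos hx]
    have hxl : x ∈ l := (PySem.Set.mem_ofList l x).mp hx
    rw [if_neg (by tauto)]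
    rw [List.append_nil]
    exact List.filter_congr (fun p _ => hpt p)
  · rw [if_neg hx]
    have hxl : x ∉ l := fun h => hx ((PySem.Set.mem_ofList l x).mpr h)
    rw [List.filter_append]
    have h1 : List.filter (fun p => !(l ++ [x]).contains (p.2, p.1)) (PySem.Set.ofList l)
        = List.filter (fun p => !((p.2, p.1) == x) && !l.contains (p.2, p.1))
            (PySem.Set.ofList l) := List.filter_congr (fun p _ => hpt p)
    rw [h1]
    congr 1
    by_cases hc : (x.2, x.1) ∉ l ∧ (x.2, x.1) ≠ x
    · rw [if_pos ⟨hxl, hc.1, hc.2⟩]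
      simp [List.contains_eq_mem, hc.1, hc.2]
    · rw [if_neg (by tauto)]
      have : (!(l ++ [x]).contains (x.2, x.1)) = false := by
        rw [List.contains_append]
        rcases not_and_or.mp hc with h | h
        · simp [List.contains_eq_mem, not_not.mp h]
        · simp [List.contains_eq_mem, not_not.mp h]
      simp only [List.filter_cons, List.filter_nil, this]
      simp

-- swapping both sides of a pair equality
theorem beq_swap (p x : String × String) : ((p.2, p.1) == x) = (p == (x.2, x.1)) := by
  rw [Bool.eq_iff_iff]
  simp [Prod.ext_iff, and_comm]

-- loop invariant of B's single pass: the state after a prefix is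
-- (the pairs seen, the canonical result of the prefix)
theorem alt_loop_inv (l : List (String × String)) :
    l.foldl
      (fun (st : PySem.Set (String × String) × PySem.Set (String × String)) pair =>
        let seen := st.1.add pair
        if seen.contains (pair.2, pair.1)
        then (seen, st.2.discard (pair.2, pair.1))
        else (seen, st.2.add pair))
      ([], [])
      = (PySem.Set.ofList l, keepF l) := by
  induction l using List.reverseRecOn with
  | nil => simp [keepF, PySem.Set.ofList_nil]
  | append_singleton l x ih =>
    rw [List.foldl_append, ih, List.foldl_cons, List.foldl_nil]
    simp only [← PySem.Set.ofList_append_singleton]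
    rw [keepF_append]
    by_cases hc : (x.2, x.1) ∈ l ∨ (x.2, x.1) = x
    · have hcontains : (PySem.Set.ofList (l ++ [x])).contains (x.2, x.1) = true := by
        rw [PySem.Set.contains_iff, PySem.Set.mem_ofList, List.mem_append]
        rcases hc with h | h
        · exact Or.inl h
        · exact Or.inr (by simp [h])
      rw [if_pos hcontains, if_neg (by tauto)]
      rw [List.append_nil, PySem.Set.discard]
      congr 1
      apply List.filter_congr
      intro p _
      rw [beq_swap]
    · rw [not_or] at hc
      have hcontains : (PySem.Set.ofList (l ++ [x])).contains (x.2, x.1) = false := by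
        rw [← Bool.not_eq_true, PySem.Set.contains_iff, PySem.Set.mem_ofList,
          List.mem_append]
        simp [hc.1, hc.2]
      rw [if_neg (by rw [hcontains]; simp)]
      congr 1
      have hkeep_sub : ∀ p ∈ keepF l, p ∈ l := by
        intro p hp
        unfold keepF at hp
        exact (PySem.Set.mem_ofList l p).mp (List.mem_of_mem_filter hp)
      have hfilt : (keepF l).filter (fun p => !((p.2, p.1) == x)) = keepF l := by
        apply List.filter_eq_self.mpr
        intro p hp
        have hpl : p ∈ l := hkeep_sub p hp
        simp only [Bool.not_eq_eq_eq_not, Bool.not_true, beq_eq_false_iff_ne, ne_eq]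
        intro he
        apply hc.1
        rw [← he]
        simpa using hpl
      rw [hfilt]
      by_cases hxl : x ∈ l
      · rw [if_neg (by tauto), List.append_nil, PySem.Set.add_of_mem]
        unfold keepF
        rw [List.mem_filter]
        refine ⟨(PySem.Set.mem_ofList l x).mpr hxl, ?_⟩
        simp [List.contains_eq_mem, hc.1]
      · rw [if_pos ⟨hxl, hc.1, hc.2⟩, PySem.Set.add_of_not_mem]
        intro hmem
        exact hxl (hkeep_sub x hmem)

-- ===== VERDICT =====
theorem calculate_causality_py_spec : Claim_equal_calculate_causality_py := by
  intro ds _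
  unfold Spec_calculate_causality_py calculate_causality_py calculate_causality_py_alt
  rw [alt_loop_inv]
  have h1 : List.foldl
      (fun causality pair =>
        if ds.contains (pair.2, pair.1) then causality else causality ++ [(pair.1, pair.2)])
      ([] : List (String × String)) ds
      = (List.filter (fun x => !ds.contains (x.2, x.1)) ds).map (fun pair => (pair.1, pair.2)) := by
    simpa using foldl_skip_if (fun pair => ds.contains (pair.2, pair.1))
      (fun pair => (pair.1, pair.2)) ds []
  rw [h1]
  have hmap : (List.filter (fun x => !ds.contains (x.2, x.1)) ds).map
      (fun pair => (pair.1, pair.2)) = List.filter (fun x => !ds.contains (x.2, x.1)) ds := by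
    simp
  rw [hmap, ofList_filter]
  rfl
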